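-- pv_equiv track=rewrite | github.com/s4126139/Discrete_math | dice_game.py | find_best_dice
-- ===== SOURCE A (Python) =====
-- def count_wins(dice1, dice2):
--     wins1 = 0
--     wins2 = 0
--     for x in dice1:
--         for y in dice2:
--             if x > y:
--                 wins1 += 1
--             elif y > x:
--                 wins2 += 1
--     return wins1, wins2
--
-- def find_best_dice(dices):
--     n = len(dices)
--     for i in range(n):
--         good = True
--         for j in range(n):
--             if i == j:
--                 continue
--             wins_i, wins_j = count_wins(dices[i], dices[j])
--             if wins_i <= wins_j:
--                 good = False
--                 break
--         if good:
--             return i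
--     return -1
-- ===== SOURCE B (Python) =====
-- def _beats(a, b):
--     # a, b sorted ascending; True iff (#pairs x>y) > (#pairs y>x),
--     # counted by a single two-pointer merge over both sorted lists.
--     mb = len(b)
--     wins = 0
--     losses = 0
--     p = 0  # number of elements of b strictly below the current x
--     q = 0  # number of elements of b at most the current x
--     for x in a:
--         while p < mb and b[p] < x:
--             p += 1
--         while q < mb and b[q] <= x:
--             q += 1
--         wins += p
--         losses += mb - q
--     return wins > losses
--
-- def find_best_dice(dices):
--     sd = [sorted(d) for d in dices]
--     for i, a in enumerate(sd):
--         if all(_beats(a, b) for k, b in enumerate(sd) if k != i):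
--             return i
--     return -1
-- ===== Notes on version B (the rewrite author's own statement) =====
-- stated objective: faster
-- what changed: B sorts every die once and decides each pairwise duel with a single two-pointer merge over the two sorted dice (monotone pointers counting faces below / at most each face), instead of A's nested face-by-face double loop; the driver is an enumerate/all scan over the sorted dice rather than index loops with range.
import Mathlib
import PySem

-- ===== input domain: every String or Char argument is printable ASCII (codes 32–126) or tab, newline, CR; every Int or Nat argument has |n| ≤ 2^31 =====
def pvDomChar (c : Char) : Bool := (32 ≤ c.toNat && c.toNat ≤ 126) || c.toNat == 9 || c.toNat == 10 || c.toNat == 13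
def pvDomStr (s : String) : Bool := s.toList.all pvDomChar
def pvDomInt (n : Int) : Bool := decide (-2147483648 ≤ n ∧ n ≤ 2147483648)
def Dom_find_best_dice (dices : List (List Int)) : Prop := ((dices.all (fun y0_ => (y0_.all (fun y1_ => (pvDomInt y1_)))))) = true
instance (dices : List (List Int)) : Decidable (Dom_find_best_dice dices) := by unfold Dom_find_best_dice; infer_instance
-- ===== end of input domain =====

-- B sorts every die once and decides each pairwise duel with a two-pointer merge over the two
-- sorted dice instead of A's nested face-by-face double loop; same return value on every input.

-- ===== PORT A =====
-- count_wins(dice1, dice2): nested loop accumulating the pair (wins1, wins2)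
def countWinsA (dice1 dice2 : List Int) : Int × Int :=
  dice1.foldl (fun (w : Int × Int) x =>
    dice2.foldl (fun (w : Int × Int) y =>
      if x > y then (w.1 + 1, w.2)
      else if y > x then (w.1, w.2 + 1)
      else w) w) (0, 0)

-- inner 'for j in range(n)' loop with 'continue' on j == i and 'break' (return false) on wins_i <= wins_j
def innerA (dices : List (List Int)) (i : Nat) : List Nat → Bool
  | [] => true
  | j :: rest =>
    if i = j then innerA dices i rest
    else if (countWinsA (dices.getD i []) (dices.getD j [])).1
            ≤ (countWinsA (dices.getD i []) (dices.getD j [])).2 then false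
    else innerA dices i rest

-- outer 'for i in range(n)' loop, returning the first good i, else -1
def outerA (dices : List (List Int)) : List Nat → Int
  | [] => -1
  | i :: rest => if innerA dices i (List.range dices.length) then (i : Int) else outerA dices rest

def find_best_dice (dices : List (List Int)) : Int :=
  outerA dices (List.range dices.length)

-- ===== PORT B =====
-- 'while p < mb and b[p] < x: p += 1'
def advLt (b : List Int) (x : Int) (p : Nat) : Nat :=
  if h : p < b.length then
    if b[p] < x then advLt b x (p + 1) else p
  else p
termination_by b.length - p

-- 'while q < mb and b[q] <= x: q += 1'
def advLe (b : List Int) (x : Int) (q : Nat) : Nat :=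
  if h : q < b.length then
    if b[q] ≤ x then advLe b x (q + 1) else q
  else q
termination_by b.length - q

-- loop body of _beats: advance both pointers past x, then add to wins/losses
def stepB (b : List Int) (st : Int × Int × Nat × Nat) (x : Int) : Int × Int × Nat × Nat :=
  let p := advLt b x st.2.2.1
  let q := advLe b x st.2.2.2
  (st.1 + (p : Int), st.2.1 + ((b.length : Int) - (q : Int)), p, q)

-- _beats(a, b): one pass over a with state (wins, losses, p, q)
def beatsB (a b : List Int) : Bool :=
  let st := a.foldl (stepB b) (0, 0, 0, 0)
  st.2.1 < st.1

-- 'for i, a in enumerate(sd): if all(_beats(a, b) for k, b in enumerate(sd) if k != i): return i'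
def outerB (sd : List (List Int)) : List (Int × List Int) → Int
  | [] => -1
  | (i, a) :: rest =>
    if (PySem.List.enumerate sd 0).all (fun kb => decide (kb.1 = i) || beatsB a kb.2) then i
    else outerB sd rest

def find_best_dice_alt (dices : List (List Int)) : Int :=
  let sd := dices.map (fun d => PySem.List.sorted d (fun x => x) false)
  outerB sd (PySem.List.enumerate sd 0)

-- ===== PRECONDITION & SPEC =====
def Spec_find_best_dice (dices : List (List Int)) (out : Int) : Prop := out = find_best_dice_alt dices
instance (dices : List (List Int)) (out : Int) : Decidable (Spec_find_best_dice dices out) := by unfold Spec_find_best_dice; infer_instance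

-- ===== CLAIM =====
def Claim_equal_find_best_dice : Prop := ∀ (dices : List (List Int)), Dom_find_best_dice dices → Spec_find_best_dice dices (find_best_dice dices)

-- ===== LEMMAS AND PROOFS =====

-- the while loop 'advance while b[p] < x', started at or below bisect_left, stops exactly there
lemma advLt_eq (b : List Int) (hb : b.Pairwise (· ≤ ·)) (x : Int) :
    ∀ (n p : Nat), p ≤ PySem.List.bisectLeft b x → PySem.List.bisectLeft b x - p = n →
      advLt b x p = PySem.List.bisectLeft b x := by
  obtain ⟨hle, h1, h2⟩ := PySem.List.bisectLeft_spec b x hb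
  intro n
  induction n with
  | zero =>
    intro p hp hn
    rw [advLt]
    by_cases h : p < b.length
    · rw [dif_pos h, if_neg (not_lt.mpr (h2 p h (by omega)))]
      omega
    · rw [dif_neg h]
      omega
  | succ m ih =>
    intro p hp hn
    have hlt : p < PySem.List.bisectLeft b x := by omega
    have hplen : p < b.length := lt_of_lt_of_le hlt hle
    rw [advLt, dif_pos hplen, if_pos (h1 p hplen hlt)]
    exact ih (p + 1) (by omega) (by omega)

lemma advLe_eq (b : List Int) (hb : b.Pairwise (· ≤ ·)) (x : Int) :
    ∀ (n q : Nat), q ≤ PySem.List.bisectRight b x → PySem.List.bisectRight b x - q = n →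
      advLe b x q = PySem.List.bisectRight b x := by
  obtain ⟨hle, h1, h2⟩ := PySem.List.bisectRight_spec b x hb
  intro n
  induction n with
  | zero =>
    intro q hq hn
    rw [advLe]
    by_cases h : q < b.length
    · rw [dif_pos h, if_neg (not_le.mpr (h2 q h (by omega)))]
      omega
    · rw [dif_neg h]
      omega
  | succ m ih =>
    intro q hq hn
    have hlt : q < PySem.List.bisectRight b x := by omega
    have hqlen : q < b.length := lt_of_lt_of_le hlt hle
    rw [advLe, dif_pos hqlen, if_pos (h1 q hqlen hlt)]
    exact ih (q + 1) (by omega) (by omega)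

lemma bisectLeft_eq_countP (s : List Int) (hs : s.Pairwise (· ≤ ·)) (x : Int) :
    PySem.List.bisectLeft s x = s.countP (fun y => decide (y < x)) := by
  obtain ⟨hle, h1, h2⟩ := PySem.List.bisectLeft_spec s x hs
  have key : ∀ (t : List Int) (k : Nat), k ≤ t.length →
      (∀ (j : Nat) (hj : j < t.length), j < k → t[j] < x) →
      (∀ (j : Nat) (hj : j < t.length), k ≤ j → x ≤ t[j]) →
      t.countP (fun y => decide (y < x)) = k := by
    intro t
    induction t with
    | nil => intro k hk _ _; simp only [List.length_nil, Nat.le_zero] at hk; simp [hk]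
    | cons a u ih =>
      intro k hk ha hb'
      cases k with
      | zero =>
        have h0 : ¬ a < x := not_lt.mpr (hb' 0 (by simp) (by omega))
        have hu : u.countP (fun y => decide (y < x)) = 0 := by
          apply ih 0 (by omega) (by omega)
          intro j hj _
          have := hb' (j + 1) (by simpa using Nat.succ_lt_succ hj) (by omega)
          simpa using this
        simp [h0, hu]
      | succ k' =>
        have h0 : a < x := ha 0 (by simp) (by omega)
        have hu : u.countP (fun y => decide (y < x)) = k' := by
          apply ih k' (by simpa using hk)
          · intro j hj hjk
            have := ha (j + 1) (by simpa using Nat.succ_lt_succ hj) (by omega)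
            simpa using this
          · intro j hj hjk
            have := hb' (j + 1) (by simpa using Nat.succ_lt_succ hj) (by omega)
            simpa using this
        simp [h0, hu]
  exact (key s _ hle (fun j hj hjk => h1 j hj hjk) (fun j hj hjk => h2 j hj hjk)).symm

lemma bisectRight_eq_countP (s : List Int) (hs : s.Pairwise (· ≤ ·)) (x : Int) :
    PySem.List.bisectRight s x = s.countP (fun y => decide (y ≤ x)) := by
  obtain ⟨hle, h1, h2⟩ := PySem.List.bisectRight_spec s x hs
  have key : ∀ (t : List Int) (k : Nat), k ≤ t.length →
      (∀ (j : Nat) (hj : j < t.length), j < k → t[j] ≤ x) →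
      (∀ (j : Nat) (hj : j < t.length), k ≤ j → x < t[j]) →
      t.countP (fun y => decide (y ≤ x)) = k := by
    intro t
    induction t with
    | nil => intro k hk _ _; simp only [List.length_nil, Nat.le_zero] at hk; simp [hk]
    | cons a u ih =>
      intro k hk ha hb'
      cases k with
      | zero =>
        have h0 : ¬ a ≤ x := not_le.mpr (hb' 0 (by simp) (by omega))
        have hu : u.countP (fun y => decide (y ≤ x)) = 0 := by
          apply ih 0 (by omega) (by omega)
          intro j hj _
          have := hb' (j + 1) (by simpa using Nat.succ_lt_succ hj) (by omega)
          simpa using this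
        simp [h0, hu]
      | succ k' =>
        have h0 : a ≤ x := ha 0 (by simp) (by omega)
        have hu : u.countP (fun y => decide (y ≤ x)) = k' := by
          apply ih k' (by simpa using hk)
          · intro j hj hjk
            have := ha (j + 1) (by simpa using Nat.succ_lt_succ hj) (by omega)
            simpa using this
          · intro j hj hjk
            have := hb' (j + 1) (by simpa using Nat.succ_lt_succ hj) (by omega)
            simpa using this
        simp [h0, hu]
  exact (key s _ hle (fun j hj hjk => h1 j hj hjk) (fun j hj hjk => h2 j hj hjk)).symm

lemma bisectLeft_mono (b : List Int) (hb : b.Pairwise (· ≤ ·)) {x x' : Int} (h : x ≤ x') :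
    PySem.List.bisectLeft b x ≤ PySem.List.bisectLeft b x' := by
  rw [bisectLeft_eq_countP b hb, bisectLeft_eq_countP b hb]
  exact List.countP_mono_left (fun y _ hy => by simp at hy ⊢; omega)

lemma bisectRight_mono (b : List Int) (hb : b.Pairwise (· ≤ ·)) {x x' : Int} (h : x ≤ x') :
    PySem.List.bisectRight b x ≤ PySem.List.bisectRight b x' := by
  rw [bisectRight_eq_countP b hb, bisectRight_eq_countP b hb]
  exact List.countP_mono_left (fun y _ hy => by simp at hy ⊢; omega)

-- B's single pass: the two accumulators end up as the sums of per-face bisect counts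
lemma foldB_eq (b : List Int) (hb : b.Pairwise (· ≤ ·)) :
    ∀ (a : List Int), a.Pairwise (· ≤ ·) →
    ∀ (w l : Int) (p q : Nat),
      (∀ x ∈ a, p ≤ PySem.List.bisectLeft b x) →
      (∀ x ∈ a, q ≤ PySem.List.bisectRight b x) →
      ((a.foldl (stepB b) (w, l, p, q)).1, (a.foldl (stepB b) (w, l, p, q)).2.1)
      = (w + (a.map (fun x => (PySem.List.bisectLeft b x : Int))).sum,
         l + (a.map (fun x => ((b.length : Int) - (PySem.List.bisectRight b x : Int)))).sum) := by
  intro a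
  induction a with
  | nil => intro _ w l p q _ _; simp
  | cons x t ih =>
    intro hsa w l p q hp hq
    have hpx : advLt b x p = PySem.List.bisectLeft b x :=
      advLt_eq b hb x _ p (hp x (by simp)) rfl
    have hqx : advLe b x q = PySem.List.bisectRight b x :=
      advLe_eq b hb x _ q (hq x (by simp)) rfl
    simp only [List.foldl_cons, List.map_cons, List.sum_cons, stepB, hpx, hqx]
    rw [ih hsa.of_cons
        (w + (PySem.List.bisectLeft b x : Int))
        (l + ((b.length : Int) - (PySem.List.bisectRight b x : Int)))
        (PySem.List.bisectLeft b x) (PySem.List.bisectRight b x)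
        (fun x' hx' => bisectLeft_mono b hb (List.rel_of_pairwise_cons hsa hx'))
        (fun x' hx' => bisectRight_mono b hb (List.rel_of_pairwise_cons hsa hx'))]
    simp only [Prod.mk.injEq]
    exact ⟨by omega, by omega⟩

-- a fold adding two per-element contributions is the pair of sums
lemma foldl_pairadd (f g : Int → Int) :
    ∀ (a : List Int) (w l : Int),
      a.foldl (fun (s : Int × Int) x => (s.1 + f x, s.2 + g x)) (w, l)
        = (w + (a.map f).sum, l + (a.map g).sum) := by
  intro a
  induction a with
  | nil => intro w l; simp
  | cons x t ih =>
    intro w l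
    simp only [List.foldl_cons, List.map_cons, List.sum_cons, ih]
    simp only [Prod.mk.injEq]
    exact ⟨by omega, by omega⟩

-- A's inner fold over dice2 adds the two counts
lemma countWinsA_step (x : Int) (d2 : List Int) (w : Int × Int) :
    d2.foldl (fun (w : Int × Int) y =>
      if x > y then (w.1 + 1, w.2)
      else if y > x then (w.1, w.2 + 1)
      else w) w
    = (w.1 + (d2.countP (fun y => decide (y < x)) : Int),
       w.2 + (d2.countP (fun y => decide (x < y)) : Int)) := by
  induction d2 generalizing w with
  | nil => simp
  | cons a t ih =>
    simp only [List.foldl_cons, List.countP_cons]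
    rcases lt_trichotomy a x with h | h | h
    · rw [if_pos (by omega), ih]
      have h' : ¬ x < a := by omega
      simp only [h, h', decide_true, decide_false]
      simp [Prod.ext_iff]
      omega
    · subst h
      rw [if_neg (by omega), if_neg (by omega), ih]
      simp
    · rw [if_neg (by omega), if_pos (by omega), ih]
      have h' : ¬ a < x := by omega
      simp only [h, h', decide_true, decide_false]
      simp [Prod.ext_iff]
      omega

-- A's pair count, as the pair of sums of per-face counts
lemma countWinsA_closed (d1 d2 : List Int) :
    countWinsA d1 d2
      = ((d1.map (fun x => (d2.countP (fun y => decide (y < x)) : Int))).sum,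
         (d1.map (fun x => (d2.countP (fun y => decide (x < y)) : Int))).sum) := by
  unfold countWinsA
  have hstep : (fun (w : Int × Int) x =>
      d2.foldl (fun (w : Int × Int) y =>
        if x > y then (w.1 + 1, w.2)
        else if y > x then (w.1, w.2 + 1)
        else w) w)
    = (fun (w : Int × Int) x =>
      (w.1 + (d2.countP (fun y => decide (y < x)) : Int),
       w.2 + (d2.countP (fun y => decide (x < y)) : Int))) := by
    funext w x; exact countWinsA_step x d2 w
  rw [hstep, foldl_pairadd]
  simp

-- the duel verdicts agree: B's two-pointer beats = 'wins_i > wins_j' from A's nested count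
lemma beats_eq (d1 d2 : List Int) :
    beatsB (PySem.List.sorted d1 (fun x => x) false) (PySem.List.sorted d2 (fun x => x) false)
      = decide ((countWinsA d1 d2).2 < (countWinsA d1 d2).1) := by
  set a := PySem.List.sorted d1 (fun x => x) false with hadef
  set b := PySem.List.sorted d2 (fun x => x) false with hbdef
  have ha : a.Pairwise (· ≤ ·) := by simpa using PySem.List.sorted_pairwise d1 (fun x => x)
  have hb : b.Pairwise (· ≤ ·) := by simpa using PySem.List.sorted_pairwise d2 (fun x => x)
  have hpa : a.Perm d1 := PySem.List.sorted_perm d1 (fun x => x) false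
  have hpb : b.Perm d2 := PySem.List.sorted_perm d2 (fun x => x) false
  have hfold := foldB_eq b hb a ha 0 0 0 0 (fun _ _ => Nat.zero_le _) (fun _ _ => Nat.zero_le _)
  have h1 : (a.map (fun x => (PySem.List.bisectLeft b x : Int))).sum
      = (d1.map (fun x => (d2.countP (fun y => decide (y < x)) : Int))).sum := by
    have hf : (fun x => (PySem.List.bisectLeft b x : Int))
        = (fun x => (d2.countP (fun y => decide (y < x)) : Int)) := by
      funext x
      rw [bisectLeft_eq_countP b hb, hpb.countP_eq]
    rw [hf]
    exact (hpa.map _).sum_eq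
  have h2 : (a.map (fun x => ((b.length : Int) - (PySem.List.bisectRight b x : Int)))).sum
      = (d1.map (fun x => (d2.countP (fun y => decide (x < y)) : Int))).sum := by
    have hf : (fun x => ((b.length : Int) - (PySem.List.bisectRight b x : Int)))
        = (fun x => (d2.countP (fun y => decide (x < y)) : Int)) := by
      funext x
      rw [bisectRight_eq_countP b hb, hpb.countP_eq, hpb.length_eq]
      have hsplit := List.length_eq_countP_add_countP (fun y => decide (y ≤ x)) (l := d2)
      have heq : (fun a : Int => decide ¬(decide (a ≤ x) = true)) = (fun y : Int => decide (x < y)) := by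
        funext y; by_cases h : y ≤ x <;> simp [h]; omega
      rw [heq] at hsplit
      omega
    rw [hf]
    exact (hpa.map _).sum_eq
  rw [countWinsA_closed]
  have hl := congrArg Prod.fst hfold
  have hr := congrArg Prod.snd hfold
  simp only at hl hr
  show decide ((a.foldl (stepB b) (0, 0, 0, 0)).2.1 < (a.foldl (stepB b) (0, 0, 0, 0)).1) = _
  rw [hl, hr, h1, h2]
  simp

-- A's inner loop with break = an 'all' over the index list
lemma innerA_eq_all (dices : List (List Int)) (i : Nat) (js : List Nat) :
    innerA dices i js
      = js.all (fun j => decide (i = j) ||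
          decide ((countWinsA (dices.getD i []) (dices.getD j [])).2
                    < (countWinsA (dices.getD i []) (dices.getD j [])).1)) := by
  induction js with
  | nil => rfl
  | cons j rest ih =>
    simp only [innerA, List.all_cons]
    by_cases hij : i = j
    · rw [if_pos hij, decide_eq_true hij, Bool.true_or, Bool.true_and]
      exact ih
    · rw [if_neg hij, decide_eq_false hij, Bool.false_or]
      by_cases hle : (countWinsA (dices.getD i []) (dices.getD j [])).1
          ≤ (countWinsA (dices.getD i []) (dices.getD j [])).2
      · rw [if_pos hle, decide_eq_false (not_lt.mpr hle), Bool.false_and]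
      · rw [if_neg hle, decide_eq_true (not_le.mp hle), Bool.true_and]
        exact ih

-- sorted_dices[j] is sorted(dices[j]) (unconditionally: both defaults are [])
lemma sd_getD (dices : List (List Int)) (j : Nat) :
    (dices.map (fun d => PySem.List.sorted d (fun x => x) false)).getD j []
      = PySem.List.sorted (dices.getD j []) (fun x => x) false := by
  unfold List.getD
  rw [List.getElem?_map]
  cases h : dices[j]? with
  | none => simp [PySem.List.sorted_eq_nil_iff]
  | some d => simp

-- enumerate(sd) is range over indices paired with getD
lemma enum_eq (sd : List (List Int)) :
    PySem.List.enumerate sd 0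
      = (List.range sd.length).map (fun (j : Nat) => ((j : Int), sd.getD j [])) := by
  apply List.ext_getElem
  · simp [PySem.List.length_enumerate]
  · intro k h1 h2
    rw [PySem.List.getElem_enumerate]
    simp only [List.getElem_map, List.getElem_range]
    have hk : k < sd.length := by simpa using h2
    rw [List.getD_eq_getElem sd [] hk]
    simp

-- the two loop conditions agree
lemma cond_eq (dices : List (List Int)) (i : Nat) :
    innerA dices i (List.range dices.length)
      = (PySem.List.enumerate (dices.map (fun d => PySem.List.sorted d (fun x => x) false)) 0).all
          (fun kb => decide (kb.1 = (i : Int)) ||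
            beatsB ((dices.map (fun d => PySem.List.sorted d (fun x => x) false)).getD i []) kb.2) := by
  set sd := dices.map (fun d => PySem.List.sorted d (fun x => x) false) with hsd
  rw [enum_eq, List.all_map, innerA_eq_all]
  have hlen : sd.length = dices.length := by simp [hsd]
  rw [hlen]
  congr 1
  funext j
  simp only [Function.comp]
  have hbeq : decide (((j : Nat) : Int) = ((i : Nat) : Int)) = decide (i = j) := by
    simp [eq_comm]
  rw [hbeq, sd_getD, sd_getD, beats_eq]

-- the two outer loops agree, step for step over the index list
lemma outer_eq (dices : List (List Int)) :
    ∀ (js : List Nat),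
      outerA dices js
        = outerB (dices.map (fun d => PySem.List.sorted d (fun x => x) false))
            (js.map (fun (j : Nat) => ((j : Int),
              (dices.map (fun d => PySem.List.sorted d (fun x => x) false)).getD j []))) := by
  intro js
  induction js with
  | nil => rfl
  | cons j rest ih =>
    simp only [outerA, outerB, List.map_cons, cond_eq, ih]

-- ===== VERDICT (by name: the statement is the Claim_ definition above) =====
theorem find_best_dice_spec : Claim_equal_find_best_dice := by
  intro dices _
  unfold Spec_find_best_dice find_best_dice find_best_dice_alt
  show outerA dices (List.range dices.length)
      = outerB (dices.map (fun d => PySem.List.sorted d (fun x => x) false))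
          (PySem.List.enumerate (dices.map (fun d => PySem.List.sorted d (fun x => x) false)) 0)
  rw [enum_eq, outer_eq dices]
  have hlen : (dices.map (fun d => PySem.List.sorted d (fun x => x) false)).length = dices.length := by
    simp
  rw [hlen]
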